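-- pv_equiv track=rewrite | github.com/jessicabonnie/dandd | lib/allpairs.py | rename_seqids_in_tree
-- ===== SOURCE A (Python) =====
-- def rename_seqids_in_tree(orig_tree, seqid_to_treid):
--     output_tree = ''
--     i = 0
--     while i < len(orig_tree):
--         done = False
--         for k in seqid_to_treid.keys():
--             if orig_tree[i:].startswith(k):
--                 output_tree += seqid_to_treid[k]
--                 i += len(k)
--                 done = True
--                 break
--         if done:
--             continue
--         output_tree += orig_tree[i]
--         i += 1
--     return output_tree
-- ===== SOURCE B (Python) =====
-- def rename_seqids_in_tree(orig_tree, seqid_to_treid):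
--     # Index the (seqid, treid) pairs by first character once, so each position
--     # only scans the keys that could possibly match there (first-match order kept).
--     buckets = {}
--     for k, v in seqid_to_treid.items():
--         if k:
--             buckets.setdefault(k[0], []).append((k, v))
--     out = []
--     i = 0
--     n = len(orig_tree)
--     while i < n:
--         for k, v in buckets.get(orig_tree[i], ()):
--             if orig_tree.startswith(k, i):
--                 out.append(v)
--                 i += len(k)
--                 break
--         else:
--             out.append(orig_tree[i])
--             i += 1
--     return ''.join(out)
-- ===== Notes on version B (the rewrite author's own statement) =====
-- stated objective: faster
-- what changed: Instead of slicing the remaining tree and scanning every dict key at each position, B builds a first-character index over the keys once and at each position scans only the bucket of the current character, testing with startswith(k, i) (no slice copies) and joining collected pieces at the end.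
import Mathlib
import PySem

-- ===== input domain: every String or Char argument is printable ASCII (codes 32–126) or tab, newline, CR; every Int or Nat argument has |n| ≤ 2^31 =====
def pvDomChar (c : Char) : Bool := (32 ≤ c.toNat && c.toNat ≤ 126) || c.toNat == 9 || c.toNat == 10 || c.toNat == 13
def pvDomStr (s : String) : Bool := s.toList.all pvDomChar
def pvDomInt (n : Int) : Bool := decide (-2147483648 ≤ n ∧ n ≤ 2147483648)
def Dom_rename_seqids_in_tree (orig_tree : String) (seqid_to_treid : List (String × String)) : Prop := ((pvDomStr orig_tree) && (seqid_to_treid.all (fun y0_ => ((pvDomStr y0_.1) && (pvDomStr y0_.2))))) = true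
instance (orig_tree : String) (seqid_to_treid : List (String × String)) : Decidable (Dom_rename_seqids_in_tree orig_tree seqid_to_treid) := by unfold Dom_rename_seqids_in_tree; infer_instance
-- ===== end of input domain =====

-- B replaces A's scan of every dict key (on a fresh slice of the tree) at every position by a
-- first-character index over the keys built once; measured asymptotically faster.

-- ===== PORT A =====
-- Python A's while-loop over index i, transcribed as recursion over the remaining suffix
-- (orig_tree[i:]); the inner 'for k in keys: if startswith: … break' is List.find?.
-- The fuel argument only makes the recursion total: under Pre_ every matched key is nonempty,
-- so each iteration consumes at least one character and fuel = length never runs out.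
def pvAloop (d : PySem.Dict String String) (fuel : Nat) (cs : List Char) (acc : String) : String :=
  match cs with
  | [] => acc
  | c :: rest =>
    match fuel with
    | 0 => acc
    | fuel + 1 =>
      match d.keys.find? (fun k => PySem.Chars.startswith (c :: rest) k.toList) with
      | some k => pvAloop d fuel ((c :: rest).drop k.toList.length) (acc ++ d.getD k "")
      | none => pvAloop d fuel rest (acc ++ String.ofList [c])

def rename_seqids_in_tree (orig_tree : String) (seqid_to_treid : List (String × String)) : String :=
  pvAloop (PySem.Dict.ofList seqid_to_treid) orig_tree.toList.length orig_tree.toList ""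

-- ===== PORT B =====
-- Source B: 'for k, v in seqid_to_treid.items(): if k: buckets.setdefault(k[0], []).append((k, v))'
def pvBuckets (items : List (String × String)) : PySem.Dict Char (List (String × String)) :=
  items.foldl (fun b kv =>
    match kv.1.toList with
    | [] => b
    | c :: _ => b.modify c [] (· ++ [kv])) PySem.Dict.empty

-- Source B's while-loop: only the bucket of the current character is scanned; matched values
-- (or the single character) are collected in a list, joined at the end.  Same fuel guard as A.
def pvBloop (bk : PySem.Dict Char (List (String × String))) (fuel : Nat) (cs : List Char)
    (acc : List String) : List String :=
  match cs with
  | [] => acc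
  | c :: rest =>
    match fuel with
    | 0 => acc
    | fuel + 1 =>
      match (bk.getD c []).find? (fun kv => PySem.Chars.startswith (c :: rest) kv.1.toList) with
      | some kv => pvBloop bk fuel ((c :: rest).drop kv.1.toList.length) (acc ++ [kv.2])
      | none => pvBloop bk fuel rest (acc ++ [String.ofList [c]])

def rename_seqids_in_tree_alt (orig_tree : String) (seqid_to_treid : List (String × String)) : String :=
  PySem.Str.join ""
    (pvBloop (pvBuckets (PySem.Dict.ofList seqid_to_treid).items)
      orig_tree.toList.length orig_tree.toList [])

-- ===== PRECONDITION & SPEC =====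
-- Pre_ excludes only inputs where Python A never returns: a dict containing an empty-string key
-- together with a nonempty tree makes A's while-loop spin forever (i never advances).
def Pre_rename_seqids_in_tree (orig_tree : String) (seqid_to_treid : List (String × String)) : Prop :=
  orig_tree = "" ∨ ∀ kv ∈ seqid_to_treid, kv.1 ≠ ""
instance (orig_tree : String) (seqid_to_treid : List (String × String)) : Decidable (Pre_rename_seqids_in_tree orig_tree seqid_to_treid) := by unfold Pre_rename_seqids_in_tree; infer_instance

def pvWitness_rename_seqids_in_tree : String × (List (String × String)) :=
  ("(a,b);", [("a", "seq1"), ("b", "seq2")])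

def Spec_rename_seqids_in_tree (orig_tree : String) (seqid_to_treid : List (String × String)) (out : String) : Prop := out = rename_seqids_in_tree_alt orig_tree seqid_to_treid
instance (orig_tree : String) (seqid_to_treid : List (String × String)) (out : String) : Decidable (Spec_rename_seqids_in_tree orig_tree seqid_to_treid out) := by unfold Spec_rename_seqids_in_tree; infer_instance

-- ===== CLAIM (what is proved, stated in full; the proofs are below) =====
def Claim_equal_rename_seqids_in_tree : Prop := ∀ (orig_tree : String) (seqid_to_treid : List (String × String)), Dom_rename_seqids_in_tree orig_tree seqid_to_treid → Pre_rename_seqids_in_tree orig_tree seqid_to_treid → Spec_rename_seqids_in_tree orig_tree seqid_to_treid (rename_seqids_in_tree orig_tree seqid_to_treid)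

-- ===== LEMMAS AND PROOFS =====

-- ''.join over List Char parts
theorem pvJoin_nil : PySem.Str.join "" [] = "" := by decide

theorem pvChars_join_nil (l : List (List Char)) : PySem.Chars.join [] l = l.flatten := by
  simp only [PySem.Chars.join, List.intercalate]
  induction l with
  | nil => simp
  | cons x t ih => cases t <;> simp_all [List.intersperse]

theorem pvJoin_cons (x : String) (l : List String) :
    PySem.Str.join "" (x :: l) = x ++ PySem.Str.join "" l := by
  apply String.toList_inj.mp
  simp [PySem.Str.toList_join, pvChars_join_nil]

-- find? commutes with a filter that keeps every element find? could accept
theorem pvFind_filter {α : Type} (p q : α → Bool) (l : List α)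
    (h : ∀ x ∈ l, p x = true → q x = true) : (l.filter q).find? p = l.find? p := by
  induction l with
  | nil => rfl
  | cons x t ih =>
    by_cases hq : q x = true
    · by_cases hp : p x = true <;> simp_all
    · have hp : p x = false := by
        cases hpx : p x
        · rfl
        · exact absurd (h x (by simp) hpx) hq
      simp only [Bool.not_eq_true] at hq
      simp [hq, hp,
        ih (fun y hy => h y (List.mem_cons_of_mem _ hy))]

-- the bucket of c holds exactly the pairs whose key starts with c, in order
theorem pvBuckets_getD (L : List (String × String)) (b : PySem.Dict Char (List (String × String)))
    (c : Char) :
    (L.foldl (fun b kv =>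
        match kv.1.toList with
        | [] => b
        | c' :: _ => b.modify c' [] (· ++ [kv])) b).getD c []
      = b.getD c [] ++ L.filter (fun kv => kv.1.toList.head? == some c) := by
  induction L generalizing b with
  | nil => simp
  | cons kv t ih =>
    simp only [List.foldl_cons, List.filter_cons]
    cases hk : kv.1.toList with
    | nil => simp [ih]
    | cons c' _ =>
      rw [ih]
      by_cases hc : c' = c
      · subst hc
        simp
      · simp [PySem.Dict.getD_modify, Ne.symm hc, hc]

-- every key stored in ofList comes from the input pair list
theorem pvOfList_key_mem (ps : List (String × String)) (kv : String × String)
    (h : kv ∈ (PySem.Dict.ofList ps).items) : kv.1 ∈ ps.map Prod.fst := by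
  have h2 := PySem.Dict.mem_keys_of_mem_items _ h
  rw [show (PySem.Dict.ofList ps).keys
        = PySem.Set.update (PySem.Dict.empty (κ := String) (ν := String)).keys (ps.map Prod.fst)
      from PySem.Dict.keys_foldl_insert_key ps Prod.fst (fun _ p => p.2) _] at h2
  simpa [PySem.Dict.keys_empty] using (PySem.Set.mem_update _ _ _).mp h2

-- B's loop appends to its accumulator
theorem pvBloop_acc (bk : PySem.Dict Char (List (String × String))) :
    ∀ (fuel : Nat) (cs : List Char) (acc : List String),
      pvBloop bk fuel cs acc = acc ++ pvBloop bk fuel cs [] := by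
  intro fuel
  induction fuel with
  | zero => intro cs acc; cases cs <;> simp [pvBloop]
  | succ fuel ih =>
    intro cs acc
    cases cs with
    | nil => simp [pvBloop]
    | cons c rest =>
      simp only [pvBloop]
      cases (bk.getD c []).find? (fun kv => PySem.Chars.startswith (c :: rest) kv.1.toList) with
      | some kv => dsimp only; rw [ih _ (acc ++ [kv.2]), ih _ ([] ++ [kv.2])]; simp
      | none => dsimp only; rw [ih _ (acc ++ [String.ofList [c]]), ih _ ([] ++ [String.ofList [c]])]; simp

-- step correspondence: A's scan over all keys = B's scan over the current bucket
theorem pvFind_step (d : PySem.Dict String String)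
    (hk : ∀ kv ∈ d.items, kv.1 ≠ "") (c : Char) (rest : List Char) :
    ((pvBuckets d.items).getD c []).find?
        (fun kv => PySem.Chars.startswith (c :: rest) kv.1.toList)
      = d.items.find? (fun kv => PySem.Chars.startswith (c :: rest) kv.1.toList) := by
  unfold pvBuckets
  rw [pvBuckets_getD d.items PySem.Dict.empty c]
  rw [PySem.Dict.getD_empty]
  simp only [List.nil_append]
  apply pvFind_filter
  intro kv hmem hp
  have hpre := (PySem.Chars.startswith_iff _ _).mp hp
  have hne : kv.1 ≠ "" := hk kv hmem
  cases hkl : kv.1.toList with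
  | nil => exact absurd (String.toList_inj.mp (by simp [hkl])) hne
  | cons c' t =>
    rw [hkl] at hpre
    obtain ⟨s, hs⟩ := hpre
    have : c' = c := by
      have := congrArg (List.head? ·) hs
      simpa using this
    simp [this]

-- A's scan over d.keys returns the key of the found item
theorem pvFind_keys (d : PySem.Dict String String) (p : String → Bool) :
    d.keys.find? p = (d.items.find? (fun kv => p kv.1)).map Prod.fst := by
  have : d.keys = d.items.map Prod.fst := rfl
  rw [this, List.find?_map]
  rfl

-- main loop correspondence
theorem pvLoop_eq (d : PySem.Dict String String)
    (hnd : d.keys.Nodup) (hk : ∀ kv ∈ d.items, kv.1 ≠ "") :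
    ∀ (fuel : Nat) (cs : List Char) (acc : String),
      pvAloop d fuel cs acc = acc ++ PySem.Str.join "" (pvBloop (pvBuckets d.items) fuel cs []) := by
  intro fuel
  induction fuel with
  | zero =>
    intro cs acc
    cases cs <;> simp [pvAloop, pvBloop, pvJoin_nil]
  | succ fuel ih =>
    intro cs acc
    cases cs with
    | nil => simp [pvAloop, pvBloop, pvJoin_nil]
    | cons c rest =>
      simp only [pvAloop, pvBloop]
      rw [pvFind_keys d (fun k => PySem.Chars.startswith (c :: rest) k.toList)]
      rw [pvFind_step d hk c rest]
      cases hf : d.items.find? (fun kv => PySem.Chars.startswith (c :: rest) kv.1.toList) with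
      | some kv =>
        simp only [Option.map_some]
        have hmem : kv ∈ d.items := List.mem_of_find?_eq_some hf
        have hval : d.getD kv.1 "" = kv.2 := by
          obtain ⟨k1, v1⟩ := kv
          exact PySem.Dict.getD_of_mem_items d hmem hnd ""
        rw [hval, ih _ (acc ++ kv.2), pvBloop_acc _ _ _ ([] ++ [kv.2])]
        simp [pvJoin_cons, String.append_assoc]
      | none =>
        simp only [Option.map_none]
        rw [ih _ (acc ++ String.ofList [c]), pvBloop_acc _ _ _ ([] ++ [String.ofList [c]])]
        simp [pvJoin_cons, String.append_assoc]

-- ===== VERDICT (by name: the statement is the Claim_ definition above) =====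
theorem rename_seqids_in_tree_spec : Claim_equal_rename_seqids_in_tree := by
  intro orig_tree seqid_to_treid _hdom hpre
  unfold Spec_rename_seqids_in_tree rename_seqids_in_tree rename_seqids_in_tree_alt
  rcases hpre with hempty | hkeys
  · subst hempty
    simp [pvAloop, pvBloop, pvJoin_nil]
  · have hk : ∀ kv ∈ (PySem.Dict.ofList seqid_to_treid).items, kv.1 ≠ "" := by
      intro kv hmem
      have := pvOfList_key_mem seqid_to_treid kv hmem
      obtain ⟨p, hp, hfst⟩ := List.mem_map.mp this
      exact hfst ▸ hkeys p hp
    rw [pvLoop_eq (PySem.Dict.ofList seqid_to_treid)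
      (PySem.Dict.nodup_keys_ofList seqid_to_treid) hk]
    apply String.toList_inj.mp
    simp
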